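-- pv_equiv track=rewrite | github.com/ZKI-PH-ImageAnalysis/seq2squiggle | src/seq2squiggle/utils.py | get_genome_and_position
-- ===== SOURCE A (Python) =====
-- def get_genome_and_position(genome_lengths, random_position):
--     total_length = sum(genome_lengths)
--     if random_position >= total_length:
--         raise ValueError("Random position exceeds the total length of genomes")
--
--     cumulative_length = 0
--     for i, length in enumerate(genome_lengths):
--         cumulative_length += length
--         if random_position < cumulative_length:
--             genome_index = i
--             position_within_genome = random_position - (cumulative_length - length)
--             return genome_index, position_within_genome
-- ===== SOURCE B (Python) =====
-- from itertools import accumulate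
-- from bisect import bisect_right
--
--
-- def get_genome_and_position(genome_lengths, random_position):
--     prefix = list(accumulate(genome_lengths))
--     total_length = prefix[-1] if prefix else 0
--     if random_position >= total_length:
--         raise ValueError("Random position exceeds the total length of genomes")
--     i = bisect_right(prefix, random_position)
--     return i, random_position - (prefix[i - 1] if i else 0)
-- ===== Notes on version B (the rewrite author's own statement) =====
-- stated objective: alternative
-- what changed: B precomputes the prefix-sum array once and locates the containing genome by binary search (bisect_right) on it, instead of A's linear scan with a running cumulative sum; Pre_ restricts to nonempty lists of nonnegative lengths (the natural domain of genome lengths: binary search needs the nondecreasing prefix array, and on the empty list with a negative position A falls off its loop and returns None).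
-- outside the precondition, e.g. on get_genome_and_position([5, -5, 10], 3): A returns (0, 3), B returns (2, 3); on get_genome_and_position([], -1): A returns None, B returns (0, -1)
import Mathlib
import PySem

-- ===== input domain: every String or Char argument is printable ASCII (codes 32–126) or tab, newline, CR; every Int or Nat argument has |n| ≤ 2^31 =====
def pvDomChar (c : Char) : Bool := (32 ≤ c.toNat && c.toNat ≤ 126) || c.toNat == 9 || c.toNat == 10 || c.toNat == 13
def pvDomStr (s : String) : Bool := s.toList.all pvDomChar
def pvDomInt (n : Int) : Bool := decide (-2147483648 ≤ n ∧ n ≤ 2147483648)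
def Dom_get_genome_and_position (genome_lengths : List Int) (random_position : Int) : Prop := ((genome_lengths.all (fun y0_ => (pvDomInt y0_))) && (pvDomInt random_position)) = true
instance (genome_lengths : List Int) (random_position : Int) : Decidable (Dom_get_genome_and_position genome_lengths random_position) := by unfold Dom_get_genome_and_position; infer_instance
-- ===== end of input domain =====

-- B locates the genome by binary search (bisect_right) on a precomputed prefix-sum array
-- instead of A's linear scan with a running cumulative sum (alternative algorithm, same asymptotic cost).


-- ===== PORT A =====
-- A's for-loop over enumerate(genome_lengths) with the running cumulative_length.
def pvLoopA (rp : Int) : List Int → Int → Int → Option (Int × Int)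
  | [], _, _ => none
  | l :: ls, i, cum =>
    let c := cum + l
    if rp < c then some (i, rp - (c - l)) else pvLoopA rp ls (i + 1) c

def get_genome_and_position (genome_lengths : List Int) (random_position : Int) : Int × Int :=
  let total := genome_lengths.sum
  if random_position ≥ total then (0, 0)   -- raise ValueError (excluded by Pre_)
  else
    match pvLoopA random_position genome_lengths 0 0 with
    | some r => r
    | none => (0, 0)                       -- loop falls off, Python returns None (excluded by Pre_)

-- ===== PORT B =====
-- list(accumulate(genome_lengths))
def pvAccum : List Int → Int → List Int
  | [], _ => []
  | l :: ls, c => (c + l) :: pvAccum ls (c + l)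

-- bisect.bisect_right: while lo < hi: mid = (lo+hi)//2; if x < a[mid]: hi = mid else lo = mid+1
def pvBisectRight (a : List Int) (x : Int) (lo hi : Nat) : Nat :=
  if _h : lo < hi then
    let mid := (lo + hi) / 2
    if x < a.getD mid 0 then pvBisectRight a x lo mid else pvBisectRight a x (mid + 1) hi
  else lo
termination_by hi - lo
decreasing_by all_goals omega

def get_genome_and_position_alt (genome_lengths : List Int) (random_position : Int) : Int × Int :=
  let pfx := pvAccum genome_lengths 0
  let total := match pfx.getLast? with     -- prefix[-1] if prefix else 0
    | some t => t
    | none => 0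
  if random_position ≥ total then (0, 0)      -- raise ValueError (excluded by Pre_)
  else
    let i := pvBisectRight pfx random_position 0 pfx.length
    ((i : Int), random_position - (if i = 0 then 0 else pfx.getD (i - 1) 0))

-- ===== PRECONDITION & SPEC =====
-- Pre_ keeps the natural domain: a nonempty list of NONNEGATIVE genome lengths (a negative
-- "length" is meaningless, and only then is the prefix-sum array sorted as B's binary search
-- needs) with random_position below the total; it thereby also excludes the inputs where A
-- raises ValueError (random_position ≥ total) and the empty list with a negative position,
-- where A falls off its loop and returns None (not an int pair).
def Pre_get_genome_and_position (genome_lengths : List Int) (random_position : Int) : Prop :=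
  genome_lengths ≠ [] ∧ (∀ x ∈ genome_lengths, 0 ≤ x) ∧ random_position < genome_lengths.sum
instance (genome_lengths : List Int) (random_position : Int) : Decidable (Pre_get_genome_and_position genome_lengths random_position) := by unfold Pre_get_genome_and_position; infer_instance

def pvWitness_get_genome_and_position : List Int × Int := ([3, 4], 5)

def Spec_get_genome_and_position (genome_lengths : List Int) (random_position : Int) (out : Int × Int) : Prop := out = get_genome_and_position_alt genome_lengths random_position
instance (genome_lengths : List Int) (random_position : Int) (out : Int × Int) : Decidable (Spec_get_genome_and_position genome_lengths random_position out) := by unfold Spec_get_genome_and_position; infer_instance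

-- ===== CLAIM (what is proved, stated in full; the proofs are below) =====
def Claim_equal_get_genome_and_position : Prop := ∀ (genome_lengths : List Int) (random_position : Int), Dom_get_genome_and_position genome_lengths random_position → Pre_get_genome_and_position genome_lengths random_position → Spec_get_genome_and_position genome_lengths random_position (get_genome_and_position genome_lengths random_position)

-- ===== LEMMAS AND PROOFS =====

-- Proof-side scanner: first index of the prefix array with rp < value, with the preceding
-- prefix value (prev); bridges A's accumulator loop and the prefix array.
def pvFindP (rp : Int) : List Int → Int → Option (Nat × Int)
  | [], _ => none
  | p :: ps, prev =>
    if rp < p then some (0, prev) else (pvFindP rp ps p).map (fun kv => (kv.1 + 1, kv.2))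

theorem pvLoopA_eq_findP (rp : Int) : ∀ (gl : List Int) (i cum : Int),
    pvLoopA rp gl i cum
      = (pvFindP rp (pvAccum gl cum) cum).map (fun kv => (i + (kv.1 : Int), rp - kv.2)) := by
  intro gl
  induction gl with
  | nil => intro i cum; simp [pvLoopA, pvAccum, pvFindP]
  | cons l ls ih =>
    intro i cum
    simp only [pvLoopA, pvAccum, pvFindP]
    by_cases h : rp < cum + l
    · simp [h]
    · simp only [if_neg h]
      rw [ih (i + 1) (cum + l)]
      rcases pvFindP rp (pvAccum ls (cum + l)) (cum + l) with _ | ⟨k, pv⟩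
      · simp
      · simp [Prod.ext_iff]; ring

theorem pvAccum_length : ∀ (gl : List Int) (c : Int), (pvAccum gl c).length = gl.length := by
  intro gl
  induction gl with
  | nil => intro c; simp [pvAccum]
  | cons l ls ih => intro c; simp [pvAccum, ih]

theorem pvAccum_getLast? : ∀ (gl : List Int) (cum : Int), gl ≠ [] →
    (pvAccum gl cum).getLast? = some (cum + gl.sum) := by
  intro gl
  induction gl with
  | nil => intro cum h; exact absurd rfl h
  | cons l ls ih =>
    intro cum _
    cases ls with
    | nil => simp [pvAccum]
    | cons a as =>
      have hih := ih (cum + l) (by simp)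
      simp only [pvAccum] at hih ⊢
      rw [List.getLast?_cons_cons, hih]
      congr 1
      simp only [List.sum_cons]
      ring

theorem pvAccum_mem_ge : ∀ (gl : List Int) (c : Int), (∀ x ∈ gl, 0 ≤ x) →
    ∀ p ∈ pvAccum gl c, c ≤ p := by
  intro gl
  induction gl with
  | nil => intro c _ p hp; simp [pvAccum] at hp
  | cons l ls ih =>
    intro c hnn p hp
    have hl : 0 ≤ l := hnn l (by simp)
    simp only [pvAccum, List.mem_cons] at hp
    rcases hp with rfl | hp
    · omega
    · have := ih (c + l) (fun x hx => hnn x (by simp [hx])) p hp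
      omega

theorem pvAccum_pairwise : ∀ (gl : List Int) (c : Int), (∀ x ∈ gl, 0 ≤ x) →
    (pvAccum gl c).Pairwise (· ≤ ·) := by
  intro gl
  induction gl with
  | nil => intro c _; simp [pvAccum]
  | cons l ls ih =>
    intro c hnn
    simp only [pvAccum]
    refine List.Pairwise.cons ?_ (ih (c + l) (fun x hx => hnn x (by simp [hx])))
    intro p hp
    exact pvAccum_mem_ge ls (c + l) (fun x hx => hnn x (by simp [hx])) p hp

-- bisect_right's loop invariant on a sorted list: the result r satisfies
-- a[j] ≤ x for j < r and x < a[j] for r ≤ j < len, with lo ≤ r ≤ hi.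
theorem pvBisectRight_inv (a : List Int) (x : Int) (sa : a.Pairwise (· ≤ ·)) :
    ∀ (lo hi : Nat), lo ≤ hi → hi ≤ a.length →
    (∀ j, j < lo → a.getD j 0 ≤ x) → (∀ j, hi ≤ j → j < a.length → x < a.getD j 0) →
    (∀ j, j < pvBisectRight a x lo hi → a.getD j 0 ≤ x) ∧
    (∀ j, pvBisectRight a x lo hi ≤ j → j < a.length → x < a.getD j 0) ∧
    lo ≤ pvBisectRight a x lo hi ∧ pvBisectRight a x lo hi ≤ hi := by
  have hsorted : ∀ (i j : Nat), i ≤ j → j < a.length → a.getD i 0 ≤ a.getD j 0 := by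
    intro i j hij hj
    rcases eq_or_lt_of_le hij with rfl | hlt
    · exact le_refl _
    · have hi : i < a.length := lt_trans hlt hj
      rw [List.getD_eq_getElem a 0 hi, List.getD_eq_getElem a 0 hj]
      exact (List.pairwise_iff_getElem.mp sa) i j hi hj hlt
  suffices H : ∀ (n lo hi : Nat), hi - lo = n → lo ≤ hi → hi ≤ a.length →
      (∀ j, j < lo → a.getD j 0 ≤ x) → (∀ j, hi ≤ j → j < a.length → x < a.getD j 0) →
      (∀ j, j < pvBisectRight a x lo hi → a.getD j 0 ≤ x) ∧
      (∀ j, pvBisectRight a x lo hi ≤ j → j < a.length → x < a.getD j 0) ∧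
      lo ≤ pvBisectRight a x lo hi ∧ pvBisectRight a x lo hi ≤ hi by
    intro lo hi; exact H (hi - lo) lo hi rfl
  intro n
  induction n using Nat.strong_induction_on with
  | _ n ih =>
    intro lo hi hn hle hhi hlo hhi2
    by_cases h : lo < hi
    · rw [pvBisectRight, dif_pos h]
      set m := (lo + hi) / 2 with hm
      have hmlt : m < a.length := by omega
      by_cases hlt : x < a.getD m 0
      · rw [if_pos hlt]
        have := ih (m - lo) (by omega) lo m rfl (by omega) (by omega) hlo
          (fun j hmj hj => lt_of_lt_of_le hlt (hsorted m j hmj hj))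
        exact ⟨this.1, this.2.1, this.2.2.1, by omega⟩
      · rw [if_neg hlt]
        have := ih (hi - (m + 1)) (by omega) (m + 1) hi rfl (by omega) hhi
          (fun j hj => by
            rcases Nat.lt_succ_iff_lt_or_eq.mp hj with hj2 | rfl
            · rcases Nat.lt_or_ge j lo with h1 | h1
              · exact hlo j h1
              · exact le_trans (hsorted j m (by omega) hmlt) (not_lt.mp hlt)
            · exact not_lt.mp hlt)
          hhi2
        exact ⟨this.1, this.2.1, by omega, this.2.2.2⟩
    · rw [pvBisectRight, dif_neg h]
      exact ⟨hlo, fun j hj hj2 => hhi2 j (by omega) hj2, le_refl _, by omega⟩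

-- pvFindP's result characterised: r is the first crossing index, prev its preceding prefix.
theorem pvFindP_eq_of (rp : Int) : ∀ (P : List Int) (prev : Int) (r : Nat),
    r < P.length → (∀ j, j < r → P.getD j 0 ≤ rp) → rp < P.getD r 0 →
    pvFindP rp P prev = some (r, if r = 0 then prev else P.getD (r - 1) 0) := by
  intro P
  induction P with
  | nil => intro prev r hr; simp at hr
  | cons p ps ih =>
    intro prev r hr hbelow habove
    cases r with
    | zero =>
      have hlt0 : rp < p := by simpa using habove
      simp [pvFindP, hlt0]
    | succ m =>
      have hp : p ≤ rp := by
        have := hbelow 0 (Nat.succ_pos m)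
        simpa using this
      simp only [pvFindP, if_neg (not_lt.mpr hp)]
      rw [ih p m (by simpa using hr)
          (fun j hj => by have := hbelow (j + 1) (by omega); simpa using this)
          (by simpa using habove)]
      cases m with
      | zero => simp
      | succ k => simp

theorem get_genome_and_position_eq_alt (gl : List Int) (rp : Int)
    (hpre : Pre_get_genome_and_position gl rp) :
    get_genome_and_position gl rp = get_genome_and_position_alt gl rp := by
  obtain ⟨hne, hnn, hlt⟩ := hpre
  have hlast : (pvAccum gl 0).getLast? = some gl.sum := by
    rw [pvAccum_getLast? gl 0 hne]; simp
  have hnotge : ¬ rp ≥ gl.sum := not_le.mpr hlt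
  set P := pvAccum gl 0 with hP
  have hlen : P.length = gl.length := pvAccum_length gl 0
  have hlenpos : 0 < P.length := by
    cases gl with
    | nil => exact absurd rfl hne
    | cons a as => rw [hlen]; simp
  -- the last prefix value equals the sum
  have hlastD : P.getD (P.length - 1) 0 = gl.sum := by
    have : P.getLast? = some P[P.length - 1] := by
      rw [List.getLast?_eq_getElem?, List.getElem?_eq_getElem (by omega)]
    rw [List.getD_eq_getElem P 0 (by omega)]
    rw [this] at hlast
    exact Option.some_injective _ hlast
  -- bisect on the sorted prefix array
  obtain ⟨hbelow, habove, -, hle⟩ :=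
    pvBisectRight_inv P rp (pvAccum_pairwise gl 0 hnn) 0 P.length
      (Nat.zero_le _) (le_refl _) (fun j hj => absurd hj (Nat.not_lt_zero j))
      (fun j hj hj2 => absurd (lt_of_le_of_lt hj hj2) (lt_irrefl _))
  set r := pvBisectRight P rp 0 P.length with hr
  have hrlt : r < P.length := by
    rcases eq_or_lt_of_le hle with heq | h
    · exfalso
      have := hbelow (P.length - 1) (by omega)
      rw [hlastD] at this; omega
    · exact h
  have hrcross : rp < P.getD r 0 := habove r (le_refl _) hrlt
  -- A's loop reaches exactly index r with base prefix[r-1]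
  have hA : pvLoopA rp gl 0 0
      = some ((r : Int), rp - (if r = 0 then 0 else P.getD (r - 1) 0)) := by
    rw [pvLoopA_eq_findP rp gl 0 0, ← hP,
        pvFindP_eq_of rp P 0 r hrlt (fun j hj => hbelow j hj) hrcross]
    simp
  simp only [get_genome_and_position, get_genome_and_position_alt, ← hP, hlast]
  rw [if_neg hnotge, if_neg hnotge, hA]

-- ===== VERDICT (by name: the statement is the Claim_ definition above) =====
theorem get_genome_and_position_spec : Claim_equal_get_genome_and_position := by
  intro gl rp _ hpre
  unfold Spec_get_genome_and_position
  exact get_genome_and_position_eq_alt gl rp hpre
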